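-- pv_equiv track=rewrite | github.com/KanuKim97/Algorithm | level1/부족한 금액 계산하기.py | solution
-- ===== SOURCE A (Python) =====
-- def solution(price, money, count):
--     tmp = 0
--     finalValue = 0
--
--     for i in range(1, count+1):
--         tmp += price*i
--         finalValue = tmp-money
--
--     if finalValue <= 0:
--         return 0
--
--     return finalValue
-- ===== SOURCE B (Python) =====
-- def solution(price, money, count):
--     return max(price * count * (count + 1) // 2 - money, 0)
-- ===== Notes on version B (the rewrite author's own statement) =====
-- stated objective: faster
-- what changed: Replaced the O(count) accumulation loop by the closed-form triangular sum price*count*(count+1)//2 - money clamped at 0.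
-- intended difference: For count = 0 with money < 0 A returns 0 only because the loop body never assigns finalValue, while B returns the intended clamped shortfall max(0 - money, 0) = -money. — e.g. on solution(1, -5, 0): A returns 0, B returns 5
-- outside the precondition, e.g. on solution(3, 1, -2): A returns 0, B returns 2
import Mathlib
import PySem

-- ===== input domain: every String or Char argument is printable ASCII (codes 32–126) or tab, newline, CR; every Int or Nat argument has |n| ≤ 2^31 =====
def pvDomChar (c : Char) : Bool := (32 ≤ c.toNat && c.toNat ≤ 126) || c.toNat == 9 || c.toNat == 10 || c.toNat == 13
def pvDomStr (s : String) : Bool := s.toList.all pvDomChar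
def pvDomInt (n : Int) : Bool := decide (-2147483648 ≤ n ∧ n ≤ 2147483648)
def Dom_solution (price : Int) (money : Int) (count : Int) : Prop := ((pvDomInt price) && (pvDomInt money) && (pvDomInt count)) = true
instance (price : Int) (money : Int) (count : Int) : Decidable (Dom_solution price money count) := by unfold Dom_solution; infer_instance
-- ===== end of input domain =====

-- B replaces A's O(count) accumulation loop by the closed-form triangular sum (clamped at 0): asymptotically faster.


-- ===== PORT A =====
def solution (price : Int) (money : Int) (count : Int) : Int :=
  let s := (PySem.List.pyRange 1 (count + 1) 1).foldl
      (fun (st : Int × Int) i => (st.1 + price * i, st.1 + price * i - money)) (0, 0)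
  if s.2 ≤ 0 then 0 else s.2

-- ===== PORT B =====
def solution_alt (price : Int) (money : Int) (count : Int) : Int :=
  max (PySem.Int.floordiv (price * count * (count + 1)) 2 - money) 0

-- ===== PRECONDITION & SPEC =====
-- Pre_ restricts count to the natural domain (a nonnegative number of items); for count < 0
-- A's loop never runs and it returns 0 regardless of price and money, which no caller can mean.
def Pre_solution (price : Int) (money : Int) (count : Int) : Prop := 0 ≤ count
instance (price : Int) (money : Int) (count : Int) : Decidable (Pre_solution price money count) := by unfold Pre_solution; infer_instance
def pvWitness_solution : Int × Int × Int := (3, 20, 4)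

-- For count = 0 with money < 0, A returns 0 only because the loop body never assigns
-- finalValue, while B returns the intended clamped shortfall max(0 - money, 0) = -money.
def D_solution (price : Int) (money : Int) (count : Int) : Prop := count = 0 ∧ money < 0
instance (price : Int) (money : Int) (count : Int) : Decidable (D_solution price money count) := by unfold D_solution; infer_instance

def Spec_solution (price : Int) (money : Int) (count : Int) (out : Int) : Prop :=
  ¬ D_solution price money count → out = solution_alt price money count
instance (price : Int) (money : Int) (count : Int) (out : Int) : Decidable (Spec_solution price money count out) := by unfold Spec_solution; infer_instance

def pvDiffWitness_solution : Int × Int × Int := (1, -5, 0)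
def pvDiffWitnessOut_solution : Int × Int := (0, 5)

-- ===== CLAIM (what is proved, stated in full; the proofs are below) =====
def Claim_unchanged_solution : Prop := ∀ (price : Int) (money : Int) (count : Int), Dom_solution price money count → Pre_solution price money count → Spec_solution price money count (solution price money count)
def Claim_changed_solution : Prop := Dom_solution (pvDiffWitness_solution.1) (pvDiffWitness_solution.2.1) (pvDiffWitness_solution.2.2) ∧ Pre_solution (pvDiffWitness_solution.1) (pvDiffWitness_solution.2.1) (pvDiffWitness_solution.2.2) ∧ D_solution (pvDiffWitness_solution.1) (pvDiffWitness_solution.2.1) (pvDiffWitness_solution.2.2) ∧ solution (pvDiffWitness_solution.1) (pvDiffWitness_solution.2.1) (pvDiffWitness_solution.2.2) = pvDiffWitnessOut_solution.1 ∧ solution_alt (pvDiffWitness_solution.1) (pvDiffWitness_solution.2.1) (pvDiffWitness_solution.2.2) = pvDiffWitnessOut_solution.2 ∧ pvDiffWitnessOut_solution.1 ≠ pvDiffWitnessOut_solution.2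
def Claim_exact_solution : Prop := ∀ (price : Int) (money : Int) (count : Int), Dom_solution price money count → Pre_solution price money count → D_solution price money count → solution price money count ≠ solution_alt price money count

-- ===== LEMMAS AND PROOFS =====

-- Loop invariant: after the loop over 1..n, tmp satisfies 2*tmp = price*n*(n+1) and
-- finalValue is tmp - money for n ≥ 1 (and the initial 0 for n = 0).
theorem solution_loop (price money : Int) (n : Nat) :
    ∃ t : Int,
      (PySem.List.pyRange 1 ((n : Int) + 1) 1).foldl
        (fun (st : Int × Int) i => (st.1 + price * i, st.1 + price * i - money)) (0, 0)
      = (t, if n = 0 then 0 else t - money) ∧ 2 * t = price * n * (n + 1) := by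
  induction n with
  | zero =>
      refine ⟨0, ?_, by ring⟩
      rw [PySem.List.pyRange_one_eq_nil (by norm_num)]
      simp
  | succ m ih =>
      obtain ⟨t, heq, ht⟩ := ih
      refine ⟨t + price * (m + 1), ?_, by push_cast; push_cast at ht; ring_nf; ring_nf at ht; omega⟩
      have hc : ((m + 1 : Nat) : Int) + 1 = ((m : Int) + 1) + 1 := by push_cast; ring
      rw [hc, PySem.List.pyRange_one_succ_right (by omega), List.foldl_append, heq]
      simp

theorem solution_closed (price money count : Int) (h : 0 ≤ count) :
    ∃ t : Int, solution price money count
        = (if (if count = 0 then 0 else t - money) ≤ 0 then 0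
           else (if count = 0 then 0 else t - money))
      ∧ 2 * t = price * count * (count + 1) := by
  obtain ⟨n, rfl⟩ := Int.eq_ofNat_of_zero_le h
  obtain ⟨t, heq, ht⟩ := solution_loop price money n
  refine ⟨t, ?_, ht⟩
  simp only [solution, heq]
  by_cases hn : n = 0 <;> simp [hn]

theorem floordiv_two_double (t : Int) : PySem.Int.floordiv (2 * t) 2 = t := by
  rw [PySem.Int.floordiv_eq_ediv_of_pos (by norm_num)]
  exact Int.mul_ediv_cancel_left t (by norm_num)

theorem alt_val (price money count : Int) (t : Int) (ht : 2 * t = price * count * (count + 1)) :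
    solution_alt price money count = max (t - money) 0 := by
  unfold solution_alt
  rw [← ht, floordiv_two_double]

-- ===== VERDICT (by name: the statement is the Claim_ definition above) =====
theorem solution_spec : Claim_unchanged_solution := by
  intro price money count _ hpre hd
  obtain ⟨t, heq, ht⟩ := solution_closed price money count hpre
  rw [heq, alt_val price money count t ht]
  by_cases hc : count = 0
  · have hm : ¬ money < 0 := fun hm => hd ⟨hc, hm⟩
    subst hc
    have ht0 : t = 0 := by omega
    simp [ht0]
    omega
  · simp [hc]
    omega

theorem solution_changed : Claim_changed_solution := by unfold Claim_changed_solution; decide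

theorem solution_tight : Claim_exact_solution := by
  intro price money count _ hpre hd
  obtain ⟨hc, hm⟩ := hd
  subst hc
  obtain ⟨t, heq, ht⟩ := solution_closed price money 0 le_rfl
  have ht0 : t = 0 := by omega
  rw [heq, alt_val price money 0 t ht, ht0]
  simp
  omega
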